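-- pv_equiv track=rewrite | github.com/Joachimmorken/KnowIt-Julekalender-2020 | 11.py | transform
-- ===== SOURCE A (Python) =====
-- def transform(o):
--     w1 = ""
--     for i in o[1:]:
--         w1 += chr(ord(i) + 1) if i != "z" else chr(ord(i) - 25)
--     w2 = ""
--     for i in range(len(w1)):
--         w2 += chr(97 + (((ord(w1[i]) - 97) + (ord(o[i]) - 97)) % 26))
--     return w2
-- ===== SOURCE B (Python) =====
-- def transform(o):
--     return "".join(chr(97 + (ord(a) + ord(b) - 193) % 26) for a, b in zip(o, o[1:]))
-- ===== Notes on version B (the rewrite author's own statement) =====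
-- stated objective: simpler
-- what changed: Replaced the two sequential loops and the intermediate shifted string by a single pass over adjacent character pairs, folding the shift of the second character and its end-of-alphabet wrap into the one outer mod-26 reduction.
import Mathlib
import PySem

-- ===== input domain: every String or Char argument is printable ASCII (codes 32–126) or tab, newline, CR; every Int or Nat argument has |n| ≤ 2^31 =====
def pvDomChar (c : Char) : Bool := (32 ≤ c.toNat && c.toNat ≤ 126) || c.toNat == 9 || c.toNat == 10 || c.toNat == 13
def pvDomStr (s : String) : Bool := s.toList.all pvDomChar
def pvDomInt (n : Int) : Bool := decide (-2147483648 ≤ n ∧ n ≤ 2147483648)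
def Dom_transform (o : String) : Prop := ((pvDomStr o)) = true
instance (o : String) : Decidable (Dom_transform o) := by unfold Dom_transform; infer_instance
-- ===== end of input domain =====

-- B fuses A's two loops (build the shifted string w1, then pairwise add) into one pass over adjacent pairs, for simplicity.

-- chr/ord: exact on this file's uses (every chr argument stays inside ASCII on Dom_transform)
def pyChr (n : Int) : Char := Char.ofNat n.toNat
def pyOrd (c : Char) : Int := (c.toNat : Int)

-- ===== PORT A =====
def transform (o : String) : String :=
  let cs := o.toList
  let w1 : List Char := (PySem.List.slice cs (some 1) none).foldl
    (fun w1 i => w1 ++ [if i ≠ 'z' then pyChr (pyOrd i + 1) else pyChr (pyOrd i - 25)]) []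
  let w2 : List Char := (PySem.List.pyRange 0 (w1.length : Int) 1).foldl
    (fun w2 i => w2 ++ [pyChr (97 + PySem.Int.mod ((pyOrd (PySem.List.pyGetD w1 i ' ') - 97)
                                 + (pyOrd (PySem.List.pyGetD cs i ' ') - 97)) 26)]) []
  String.ofList w2

-- ===== PORT B =====
def transform_alt (o : String) : String :=
  String.ofList ((o.toList.zip o.toList.tail).map
    (fun ab => pyChr (97 + PySem.Int.mod (pyOrd ab.1 + pyOrd ab.2 - 193) 26)))

-- ===== PRECONDITION & SPEC =====
def Spec_transform (o : String) (out : String) : Prop := out = transform_alt o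
instance (o : String) (out : String) : Decidable (Spec_transform o out) := by unfold Spec_transform; infer_instance

-- ===== CLAIM (what is proved, stated in full; the proofs are below) =====
def Claim_equal_transform : Prop := ∀ (o : String), Dom_transform o → Spec_transform o (transform o)

-- ===== LEMMAS AND PROOFS =====

-- an index loop over two lists (second one no longer) is a map over their zip
lemma range_two_getD_eq_zip {α β : Type} (g : α → α → β) (d : α) :
    ∀ (ys xs : List α), ys.length ≤ xs.length →
    (List.range ys.length).map (fun k => g (ys.getD k d) (xs.getD k d)) =
      (xs.zip ys).map (fun p => g p.2 p.1) := by
  intro ys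
  induction ys with
  | nil => intro xs _; simp
  | cons y ys ih =>
    intro xs hle
    cases xs with
    | nil => simp at hle
    | cons x xs =>
      simp only [List.length_cons, List.range_succ_eq_map, List.map_cons, List.map_map,
        List.zip_cons_cons, List.getD_cons_zero]
      refine congrArg₂ _ rfl ?_
      have := ih xs (by simpa using hle)
      simpa [Function.comp] using this

lemma toNat_ofNat_ascii (m : Nat) (h : m < 55296) : (Char.ofNat m).toNat = m := by
  have hv : Nat.isValidChar m := Or.inl h
  simp [Char.ofNat, hv]

-- A's per-pair value (shift b, then add a, mod 26) equals B's single formula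
lemma step_eq (a b : Char) (hb : pvDomChar b = true) :
    pyChr (97 + PySem.Int.mod
      ((pyOrd (if b ≠ 'z' then pyChr (pyOrd b + 1) else pyChr (pyOrd b - 25)) - 97)
        + (pyOrd a - 97)) 26)
    = pyChr (97 + PySem.Int.mod (pyOrd a + pyOrd b - 193) 26) := by
  have h26 : (0:Int) < 26 := by norm_num
  by_cases hz : b = 'z'
  · subst hz
    simp only [ne_eq, not_true_eq_false, if_false]
    have : pyOrd (pyChr (pyOrd 'z' - 25)) = 97 := by decide
    rw [this]
    refine congrArg pyChr ?_
    rw [PySem.Int.mod_eq_emod_of_pos h26, PySem.Int.mod_eq_emod_of_pos h26]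
    have : pyOrd 'z' = 122 := by decide
    rw [this]; omega
  · simp only [ne_eq, hz, not_false_eq_true, if_true]
    have hle : b.toNat ≤ 126 := by
      simp [pvDomChar] at hb; omega
    have hord : pyOrd (pyChr (pyOrd b + 1)) = pyOrd b + 1 := by
      simp only [pyChr, pyOrd]
      have h1 : ((b.toNat : Int) + 1).toNat = b.toNat + 1 := by omega
      rw [h1, toNat_ofNat_ascii _ (by omega)]
      push_cast; ring
    rw [hord]
    refine congrArg pyChr ?_
    rw [PySem.Int.mod_eq_emod_of_pos h26, PySem.Int.mod_eq_emod_of_pos h26]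
    omega

theorem transform_spec : Claim_equal_transform := by
  intro o hdom
  unfold Spec_transform transform transform_alt
  set cs := o.toList with hcs
  simp only [PySem.List.slice_from_one, PySem.List.foldl_append_singleton_eq_map,
    List.nil_append, PySem.List.pyRange_zero_nat, List.map_map, Function.comp_def,
    PySem.List.pyGetD_natCast]
  have hlen : (cs.tail.map (fun i => if i ≠ 'z' then pyChr (pyOrd i + 1) else pyChr (pyOrd i - 25))).length ≤ cs.length := by
    simp
  have key := range_two_getD_eq_zip
    (fun u v => pyChr (97 + PySem.Int.mod ((pyOrd u - 97) + (pyOrd v - 97)) 26)) ' '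
    (cs.tail.map (fun i => if i ≠ 'z' then pyChr (pyOrd i + 1) else pyChr (pyOrd i - 25))) cs hlen
  simp only [key, List.zip_map_right, List.map_map]
  refine congrArg String.ofList (List.map_congr_left ?_)
  rintro ⟨a, b⟩ hmem
  have hbcs : b ∈ cs := List.mem_of_mem_tail (List.of_mem_zip hmem).2
  have hb : pvDomChar b = true := by
    have h := hdom
    unfold Dom_transform pvDomStr at h
    rw [List.all_eq_true] at h
    exact h b hbcs
  simpa [Function.comp_def, Prod.map] using step_eq a b hb
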